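-- pv_equiv track=rewrite | github.com/BAD4R/VideoCreation | SCRIPTS/AudioScripts/Transcriber/transcribe.py | _iter_tag_spans
-- ===== SOURCE A (Python) =====
-- from typing import List, Tuple, Dict, Any, Optional
--
-- _TAG_START = "["
--
-- _TAG_END = "]"
--
-- def _iter_tag_spans(text: str) -> List[Tuple[int, int]]:
--     """Return list of [start, end) spans for bracket tags like [tag].
--     If a tag is not closed, treat it as spanning to end of string.
--     """
--     spans: List[Tuple[int, int]] = []
--     if _TAG_START not in text:
--         return spans
--     i = 0
--     n = len(text)
--     while i < n:
--         start = text.find(_TAG_START, i)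
--         if start < 0:
--             break
--         end = text.find(_TAG_END, start + 1)
--         if end < 0:
--             spans.append((start, n))
--             break
--         spans.append((start, end + 1))
--         i = end + 1
--     return spans
-- ===== SOURCE B (Python) =====
-- def _iter_tag_spans(text):
--     """Return list of [start, end) spans for bracket tags like [tag].
--     Single character-by-character state-machine scan."""
--     spans = []
--     in_tag = False
--     start = 0
--     n = len(text)
--     for i in range(n):
--         c = text[i]
--         if not in_tag:
--             if c == '[':
--                 start = i
--                 in_tag = True
--         elif c == ']':
--             spans.append((start, i + 1))
--             in_tag = False
--     if in_tag:
--         spans.append((start, n))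
--     return spans
-- ===== Notes on version B (the rewrite author's own statement) =====
-- stated objective: alternative
-- what changed: Replaces the while-loop of repeated str.find calls with a single character-by-character state-machine scan (in_tag flag + start index), appending a trailing span if a tag is still open at end of string.
import Mathlib
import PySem

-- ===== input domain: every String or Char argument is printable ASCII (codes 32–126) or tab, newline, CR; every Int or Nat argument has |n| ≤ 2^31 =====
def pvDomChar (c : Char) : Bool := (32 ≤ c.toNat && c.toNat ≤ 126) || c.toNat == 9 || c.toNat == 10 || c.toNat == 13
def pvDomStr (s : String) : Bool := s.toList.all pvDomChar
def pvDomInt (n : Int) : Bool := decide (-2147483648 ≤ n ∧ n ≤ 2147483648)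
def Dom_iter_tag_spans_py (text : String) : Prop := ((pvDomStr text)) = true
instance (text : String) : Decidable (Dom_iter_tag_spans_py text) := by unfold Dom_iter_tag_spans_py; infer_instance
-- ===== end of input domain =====

-- B replaces A's repeated str.find while-loop with one character-by-character
-- state-machine scan (in_tag flag + start index); same return value, alternative structure.

-- ===== PORT A =====
-- hand port of Python str.find for a single-character needle (exact: first index, or -1
-- encoded as none), searching from position i
def findChar (cs : List Char) (c : Char) : Option Nat :=
  match cs with
  | [] => none
  | d :: rest => if d = c then some 0 else (findChar rest c).map (· + 1)

def findFrom (cs : List Char) (c : Char) (i : Nat) : Option Nat :=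
  match findChar (cs.drop i) c with
  | none => none
  | some j => some (i + j)

theorem findFrom_ge {cs : List Char} {c : Char} {i k : Nat}
    (h : findFrom cs c i = some k) : i ≤ k := by
  unfold findFrom at h
  cases hf : findChar (cs.drop i) c with
  | none => simp [hf] at h
  | some j => simp [hf] at h; omega

-- A's while-loop, step for step: start = find('[', i); end = find(']', start+1)
def loopA (cs : List Char) (n : Nat) (i : Nat) (spans : List (Int × Int)) : List (Int × Int) :=
  if i < n then
    match hs : findFrom cs '[' i with
    | none => spans
    | some start =>
      match he : findFrom cs ']' (start + 1) with
      | none => spans ++ [((start : Int), (n : Int))]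
      | some e => loopA cs n (e + 1) (spans ++ [((start : Int), ((e : Int) + 1))])
  else spans
termination_by n - i
decreasing_by
  have h1 := findFrom_ge hs
  have h2 := findFrom_ge he
  omega

def iter_tag_spans_py (text : String) : List (Int × Int) :=
  let cs := text.toList
  if cs.contains '[' then loopA cs cs.length 0 [] else []

-- ===== PORT B =====
-- B's for-loop over range(n) with in_tag/start state; recursion over the chars
-- with an index counter i and state = none (not in a tag) / some start
def goB (cs : List Char) (i : Nat) (state : Option Nat) : List (Int × Int) :=
  match cs with
  | [] =>
    match state with
    | some s => [((s : Int), (i : Int))]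
    | none => []
  | c :: rest =>
    match state with
    | none => if c = '[' then goB rest (i + 1) (some i) else goB rest (i + 1) none
    | some s =>
      if c = ']' then ((s : Int), ((i : Int) + 1)) :: goB rest (i + 1) none
      else goB rest (i + 1) (some s)

def iter_tag_spans_py_alt (text : String) : List (Int × Int) :=
  goB text.toList 0 none

-- ===== PRECONDITION & SPEC =====
def Spec_iter_tag_spans_py (text : String) (out : List (Int × Int)) : Prop := out = iter_tag_spans_py_alt text
instance (text : String) (out : List (Int × Int)) : Decidable (Spec_iter_tag_spans_py text out) := by unfold Spec_iter_tag_spans_py; infer_instance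

-- ===== CLAIM (what is proved, stated in full; the proofs are below) =====
def Claim_equal_iter_tag_spans_py : Prop := ∀ (text : String), Dom_iter_tag_spans_py text → Spec_iter_tag_spans_py text (iter_tag_spans_py text)

-- ===== LEMMAS AND PROOFS =====

theorem findChar_lt {cs : List Char} {c : Char} {j : Nat}
    (h : findChar cs c = some j) : j < cs.length := by
  induction cs generalizing j with
  | nil => simp [findChar] at h
  | cons d rest ih =>
    unfold findChar at h
    by_cases hd : d = c
    · simp [hd] at h
      simp only [List.length_cons]
      omega
    · simp [hd] at h
      cases hf : findChar rest c with
      | none => simp [hf] at h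
      | some j' =>
        simp [hf] at h
        have := ih hf
        simp only [List.length_cons]
        omega

theorem findChar_none_of_not_mem {cs : List Char} {c : Char}
    (h : ¬ c ∈ cs) : findChar cs c = none := by
  induction cs with
  | nil => rfl
  | cons d rest ih =>
    simp at h
    simp [findChar, Ne.symm h.1, ih h.2]

theorem goB_none_of_findChar_none {cs : List Char} (i : Nat)
    (h : findChar cs '[' = none) : goB cs i none = [] := by
  induction cs generalizing i with
  | nil => rfl
  | cons d rest ih =>
    unfold findChar at h
    by_cases hd : d = '['
    · simp [hd] at h
    · simp [hd] at h
      cases hf : findChar rest '[' with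
      | none => simp [goB, hd, ih _ hf]
      | some j => simp [hf] at h

theorem goB_none_step {cs : List Char} {k : Nat} (i : Nat)
    (h : findChar cs '[' = some k) :
    goB cs i none = goB (cs.drop (k + 1)) (i + k + 1) (some (i + k)) := by
  induction cs generalizing i k with
  | nil => simp [findChar] at h
  | cons d rest ih =>
    unfold findChar at h
    by_cases hd : d = '['
    · simp [hd] at h
      subst h
      simp [goB, hd]
    · simp [hd] at h
      cases hf : findChar rest '[' with
      | none => simp [hf] at h
      | some j =>
        simp [hf] at h
        subst h
        have hih := ih (i + 1) hf
        rw [goB, if_neg hd, hih]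
        have e1 : i + 1 + j + 1 = i + (j + 1) + 1 := by omega
        have e2 : i + 1 + j = i + (j + 1) := by omega
        rw [e1, e2]
        rfl

theorem goB_some_of_findChar_none {cs : List Char} (i s : Nat)
    (h : findChar cs ']' = none) :
    goB cs i (some s) = [((s : Int), ((i + cs.length : Nat) : Int))] := by
  induction cs generalizing i with
  | nil => simp [goB]
  | cons d rest ih =>
    unfold findChar at h
    by_cases hd : d = ']'
    · simp [hd] at h
    · simp [hd] at h
      cases hf : findChar rest ']' with
      | none =>
        have hih := ih (i + 1) hf
        rw [goB, if_neg hd, hih]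
        have e1 : i + 1 + rest.length = i + (d :: rest).length := by
          simp only [List.length_cons]; omega
        rw [e1]
      | some j => simp [hf] at h

theorem goB_some_step {cs : List Char} {k : Nat} (i s : Nat)
    (h : findChar cs ']' = some k) :
    goB cs i (some s) =
      ((s : Int), ((i + k + 1 : Nat) : Int)) :: goB (cs.drop (k + 1)) (i + k + 1) none := by
  induction cs generalizing i k with
  | nil => simp [findChar] at h
  | cons d rest ih =>
    unfold findChar at h
    by_cases hd : d = ']'
    · simp [hd] at h
      subst h
      rw [goB, if_pos hd]
      norm_num
    · simp [hd] at h
      cases hf : findChar rest ']' with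
      | none => simp [hf] at h
      | some j =>
        simp [hf] at h
        subst h
        have hih := ih (i + 1) hf
        rw [goB, if_neg hd, hih]
        have e1 : i + 1 + j + 1 = i + (j + 1) + 1 := by omega
        rw [e1]
        rfl

theorem loopA_eq_goB (cs : List Char) :
    ∀ (m i : Nat) (spans : List (Int × Int)), cs.length - i ≤ m →
      loopA cs cs.length i spans = spans ++ goB (cs.drop i) i none := by
  intro m
  induction m with
  | zero =>
    intro i spans hm
    rw [loopA]
    have hi : ¬ i < cs.length := by omega
    have hdrop : cs.drop i = [] := List.drop_eq_nil_of_le (by omega)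
    simp [hi, hdrop, goB]
  | succ m ih =>
    intro i spans hm
    rw [loopA]
    split
    · rename_i hi
      split
      · rename_i hs
        unfold findFrom at hs
        cases hf : findChar (cs.drop i) '[' with
        | none => simp [goB_none_of_findChar_none i hf]
        | some j => simp [hf] at hs
      · rename_i start hs
        unfold findFrom at hs
        cases hf : findChar (cs.drop i) '[' with
        | none => simp [hf] at hs
        | some j =>
          simp [hf] at hs
          have hjlt : j < (cs.drop i).length := findChar_lt hf
          have hstart : start < cs.length := by
            rw [List.length_drop] at hjlt; omega
          have hstep := goB_none_step i hf
          have hdd : (cs.drop i).drop (j + 1) = cs.drop (i + j + 1) := by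
            rw [List.drop_drop]; congr 1
          rw [hdd] at hstep
          have hii : i + j + 1 = start + 1 := by omega
          have hij : i + j = start := by omega
          rw [hii, hij] at hstep
          split
          · rename_i he
            unfold findFrom at he
            cases hg : findChar (cs.drop (start + 1)) ']' with
            | some j' => simp [hg] at he
            | none =>
              have h2 := goB_some_of_findChar_none (start + 1) start hg
              have hlen : start + 1 + (cs.drop (start + 1)).length = cs.length := by
                rw [List.length_drop]; omega
              rw [hlen] at h2
              rw [hstep, h2]
          · rename_i e he
            unfold findFrom at he
            cases hg : findChar (cs.drop (start + 1)) ']' with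
            | none => simp [hg] at he
            | some j' =>
              simp [hg] at he
              have h2 := goB_some_step (start + 1) start hg
              have hdd2 : (cs.drop (start + 1)).drop (j' + 1) = cs.drop (e + 1) := by
                rw [List.drop_drop]; congr 1; omega
              have h3 : start + 1 + j' + 1 = e + 1 := by omega
              rw [hdd2, h3] at h2
              have hrec : loopA cs cs.length (e + 1) (spans ++ [((start : Int), ((e : Int) + 1))])
                  = (spans ++ [((start : Int), ((e : Int) + 1))]) ++ goB (cs.drop (e + 1)) (e + 1) none := by
                apply ih
                have := findChar_lt hg
                rw [List.length_drop] at this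
                omega
              rw [hrec, hstep, h2]
              have e4 : ((start : Int), ((e + 1 : Nat) : Int)) = ((start : Int), ((e : Int) + 1)) := by
                push_cast; rfl
              rw [e4]
              simp
    · rename_i hi
      have hdrop : cs.drop i = [] := List.drop_eq_nil_of_le (by omega)
      simp [hdrop, goB]

-- ===== VERDICT (by name: the statement is the Claim_ definition above) =====
theorem iter_tag_spans_py_spec : Claim_equal_iter_tag_spans_py := by
  intro text _
  unfold Spec_iter_tag_spans_py iter_tag_spans_py iter_tag_spans_py_alt
  by_cases hmem : text.toList.contains '['
  · simp only [hmem, if_true]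
    have := loopA_eq_goB text.toList (text.toList.length) 0 [] (by omega)
    simpa using this
  · simp only [hmem, Bool.false_eq_true, if_false]
    rw [goB_none_of_findChar_none 0 (findChar_none_of_not_mem (by simpa using hmem))]
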